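-- pv_equiv track=rewrite | github.com/siddharthcurious/Pythonic3-Feel | Hackerrank/soroko1.py | CountNaturalNumber
-- ===== SOURCE A (Python) =====
-- from itertools import permutations
--
-- def CountNaturalNumber(n):
--     count = 9
--     for num in range(10, n+1):
--         perms = permutations(str(num))
--         perms_set = set()
--         for p in perms:
--             number = int("".join(p))
--             perms_set.add(number)
--         for ele in perms_set:
--             if ele > num:
--                 count = count + 1
--         if len(perms_set) == 1:
--             count = count +1
--     return count
-- ===== SOURCE B (Python) =====
-- from itertools import permutations
--
-- def CountNaturalNumber(n):
--     count = 9
--     cache = {}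
--     for num in range(10, n + 1):
--         sig = ''.join(sorted(str(num)))
--         vals = cache.get(sig)
--         if vals is None:
--             vals = list({int(''.join(p)) for p in permutations(sig)})
--             cache[sig] = vals
--         for v in vals:
--             if v > num:
--                 count = count + 1
--         if len(vals) == 1:
--             count = count + 1
--     return count
-- ===== Notes on version B (the rewrite author's own statement) =====
-- stated objective: faster
-- what changed: B caches, in a dict keyed by the sorted digit string (digit-multiset signature), the list of distinct permutation values, so the factorial-size permutation enumeration and set construction run once per digit multiset instead of once per number, while each number only does a dict lookup plus a linear count.
import Mathlib
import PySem

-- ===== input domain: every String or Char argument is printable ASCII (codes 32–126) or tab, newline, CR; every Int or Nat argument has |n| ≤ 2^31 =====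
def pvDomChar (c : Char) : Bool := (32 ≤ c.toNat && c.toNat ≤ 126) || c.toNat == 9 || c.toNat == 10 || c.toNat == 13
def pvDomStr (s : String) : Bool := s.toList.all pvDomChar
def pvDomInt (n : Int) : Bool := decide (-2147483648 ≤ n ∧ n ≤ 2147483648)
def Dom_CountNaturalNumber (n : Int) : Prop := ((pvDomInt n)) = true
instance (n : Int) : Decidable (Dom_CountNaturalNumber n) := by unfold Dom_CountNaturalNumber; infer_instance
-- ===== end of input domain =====

-- B memoizes the distinct-permutation values per sorted-digit signature in a dict, so the
-- factorial-size enumeration runs once per digit multiset instead of once per number.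

-- int("".join(p)) for a tuple of digit characters p; ofChars? never returns none on the digit
-- strings that occur here, so the default is unreachable (this expression appears verbatim in both Pythons)
def pvJoinInt (p : List Char) : Int := (PySem.Int.ofChars? p).getD 0

-- ===== PORT A =====
def CountNaturalNumber (n : Int) : Int :=
  (PySem.List.pyRange 10 (n + 1) 1).foldl
    (fun count num =>
      let cs := (PySem.Int.toStr num).toList
      let perms := PySem.List.permutations cs cs.length
      let permsSet : PySem.Set Int :=
        perms.foldl (fun s p => PySem.Set.add s (pvJoinInt p)) PySem.Set.empty
      -- 'for ele in perms_set' only counts; the result is independent of the set's iteration order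
      let count := permsSet.foldl (fun c ele => if ele > num then c + 1 else c) count
      if PySem.Set.len permsSet = 1 then count + 1 else count)
    9

-- ===== PORT B =====
-- list({int(''.join(p)) for p in permutations(sig)}); only counted below, so its order is immaterial
def pvDistinctVals (sig : List Char) : List Int :=
  PySem.Set.ofList ((PySem.List.permutations sig sig.length).map pvJoinInt)

def CountNaturalNumber_alt (n : Int) : Int :=
  ((PySem.List.pyRange 10 (n + 1) 1).foldl
    (fun st num =>
      let sig := PySem.List.sorted (PySem.Int.toStr num).toList (fun c => c) false
      let (vals, cache) :=
        match st.2.get? sig with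
        | some vs => (vs, st.2)
        | none =>
            let vs := pvDistinctVals sig
            (vs, st.2.insert sig vs)
      let count := vals.foldl (fun c v => if v > num then c + 1 else c) st.1
      (if vals.length = 1 then count + 1 else count, cache))
    ((9 : Int), (PySem.Dict.empty : PySem.Dict (List Char) (List Int)))).1

-- ===== PRECONDITION & SPEC =====
def Spec_CountNaturalNumber (n : Int) (out : Int) : Prop := out = CountNaturalNumber_alt n
instance (n : Int) (out : Int) : Decidable (Spec_CountNaturalNumber n out) := by unfold Spec_CountNaturalNumber; infer_instance

-- ===== CLAIM (what is proved, stated in full; the proofs are below) =====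
def Claim_equal_CountNaturalNumber : Prop := ∀ (n : Int), Dom_CountNaturalNumber n → Spec_CountNaturalNumber n (CountNaturalNumber n)

-- ===== LEMMAS AND PROOFS =====

-- the two loop bodies, named so the fold induction can speak about them
def pvAStep (count num : Int) : Int :=
  let cs := (PySem.Int.toStr num).toList
  let perms := PySem.List.permutations cs cs.length
  let permsSet : PySem.Set Int :=
    perms.foldl (fun s p => PySem.Set.add s (pvJoinInt p)) PySem.Set.empty
  let count := permsSet.foldl (fun c ele => if ele > num then c + 1 else c) count
  if PySem.Set.len permsSet = 1 then count + 1 else count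

def pvBStep (st : Int × PySem.Dict (List Char) (List Int)) (num : Int) :
    Int × PySem.Dict (List Char) (List Int) :=
  let sig := PySem.List.sorted (PySem.Int.toStr num).toList (fun c => c) false
  let (vals, cache) :=
    match st.2.get? sig with
    | some vs => (vs, st.2)
    | none =>
        let vs := pvDistinctVals sig
        (vs, st.2.insert sig vs)
  let count := vals.foldl (fun c v => if v > num then c + 1 else c) st.1
  (if vals.length = 1 then count + 1 else count, cache)

-- every rearrangement of xs is produced by itertools-style full-length permutations
theorem pv_mem_permutations_of_perm {α : Type} :
    ∀ (p xs : List α), p.Perm xs → p ∈ PySem.List.permutations xs xs.length := by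
  intro p
  induction p with
  | nil =>
    intro xs h
    have : xs = [] := h.symm.eq_nil
    subst this
    simp [PySem.List.permutations_zero]
  | cons x p' ih =>
    intro xs h
    have hx : x ∈ xs := h.subset (List.mem_cons_self)
    obtain ⟨l₁, l₂, rfl⟩ := List.append_of_mem hx
    have hp' : p'.Perm (l₁ ++ l₂) := (h.trans List.perm_middle).cons_inv
    have hlen : (l₁ ++ x :: l₂).length = (l₁ ++ l₂).length + 1 := by
      simp [List.length_append]
      omega
    rw [hlen, PySem.List.permutations_succ]
    refine List.mem_flatMap.mpr ⟨l₁.length, ?_, ?_⟩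
    · refine List.mem_range.mpr ?_
      simp [List.length_append]
    · have hget : (l₁ ++ x :: l₂)[l₁.length]? = some x := by simp
      rw [hget]
      refine List.mem_map.mpr ⟨p', ?_, rfl⟩
      rw [List.eraseIdx_append_of_length_le le_rfl]
      simpa using ih (l₁ ++ l₂) hp'

theorem pv_mem_vals (l : List Char) (y : Int) :
    y ∈ PySem.Set.ofList ((PySem.List.permutations l l.length).map pvJoinInt) ↔
      ∃ t, t.Perm l ∧ y = pvJoinInt t := by
  rw [PySem.Set.mem_ofList]
  constructor
  · intro hy
    obtain ⟨t, ht, rfl⟩ := List.mem_map.mp hy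
    exact ⟨t, PySem.List.perm_of_mem_permutations ht, rfl⟩
  · rintro ⟨t, ht, rfl⟩
    exact List.mem_map.mpr ⟨t, pv_mem_permutations_of_perm t l ht, rfl⟩

-- B's per-signature value list is a rearrangement of A's per-number set
theorem pv_vals_perm (cs : List Char) :
    (pvDistinctVals (PySem.List.sorted cs (fun c => c) false)).Perm
      (PySem.Set.ofList ((PySem.List.permutations cs cs.length).map pvJoinInt)) := by
  have hs := PySem.List.sorted_perm cs (fun c => c) false
  refine (List.perm_ext_iff_of_nodup (PySem.Set.nodup_ofList _) (PySem.Set.nodup_ofList _)).mpr ?_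
  intro y
  rw [pv_mem_vals, pv_mem_vals]
  constructor
  · rintro ⟨t, ht, rfl⟩
    exact ⟨t, ht.trans hs, rfl⟩
  · rintro ⟨t, ht, rfl⟩
    exact ⟨t, ht.trans hs.symm, rfl⟩

-- a cache every entry of which is the pure per-signature value
def pvCacheOK (d : PySem.Dict (List Char) (List Int)) : Prop :=
  ∀ k vs, d.get? k = some vs → vs = pvDistinctVals k

-- one counting pass over a rearrangement yields the same count
theorem pv_count_perm {v1 v2 : List Int} (h : v1.Perm v2) (num c : Int) :
    v1.foldl (fun c v => if v > num then c + 1 else c) c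
      = v2.foldl (fun c v => if v > num then c + 1 else c) c := by
  have he : (fun (c v : Int) => if v > num then c + 1 else c)
      = (fun (c v : Int) => if (fun v => decide (v > num)) v = true then c + 1 else c) := by
    funext c v
    simp
  rw [he, PySem.List.foldl_count_if, PySem.List.foldl_count_if, h.countP_eq]

theorem pv_step_fst (num c : Int) (d : PySem.Dict (List Char) (List Int)) (hd : pvCacheOK d) :
    (pvBStep (c, d) num).1 = pvAStep c num := by
  unfold pvBStep pvAStep
  have hset : (PySem.List.permutations (PySem.Int.toStr num).toList
        (PySem.Int.toStr num).toList.length).foldl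
        (fun s p => PySem.Set.add s (pvJoinInt p)) PySem.Set.empty
      = PySem.Set.ofList ((PySem.List.permutations (PySem.Int.toStr num).toList
          (PySem.Int.toStr num).toList.length).map pvJoinInt) := by
    rw [← PySem.Set.update_map_eq_foldl_add, PySem.Set.update_empty]
  simp only [hset]
  have hperm := pv_vals_perm (PySem.Int.toStr num).toList
  cases hget : d.get? (PySem.List.sorted (PySem.Int.toStr num).toList (fun c => c) false) with
  | some vs =>
    have hvs := hd _ _ hget
    simp only [hvs]
    rw [pv_count_perm hperm num c, hperm.length_eq]
    simp [PySem.Set.len]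
  | none =>
    rw [pv_count_perm hperm num c, hperm.length_eq]
    simp [PySem.Set.len]

theorem pv_step_ok (num c : Int) (d : PySem.Dict (List Char) (List Int)) (hd : pvCacheOK d) :
    pvCacheOK (pvBStep (c, d) num).2 := by
  simp only [pvBStep]
  cases hget : d.get? (PySem.List.sorted (PySem.Int.toStr num).toList (fun c => c) false) with
  | some vs => exact hd
  | none =>
    intro k vs h
    simp only [PySem.Dict.get?_insert] at h
    split at h
    · rename_i hk
      subst hk
      exact (Option.some_inj.mp h).symm
    · exact hd _ _ h

theorem pv_fold (nums : List Int) :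
    ∀ (c : Int) (d : PySem.Dict (List Char) (List Int)), pvCacheOK d →
      (nums.foldl pvBStep (c, d)).1 = nums.foldl pvAStep c := by
  induction nums with
  | nil => intro c d _; rfl
  | cons num t ih =>
    intro c d hd
    simp only [List.foldl_cons]
    have hsplit : pvBStep (c, d) num = ((pvBStep (c, d) num).1, (pvBStep (c, d) num).2) := rfl
    rw [hsplit, pv_step_fst num c d hd]
    exact ih _ _ (pv_step_ok num c d hd)

-- ===== VERDICT (by name: the statement is the Claim_ definition above) =====
theorem CountNaturalNumber_spec : Claim_equal_CountNaturalNumber := by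
  intro n _
  unfold Spec_CountNaturalNumber CountNaturalNumber CountNaturalNumber_alt
  exact (pv_fold (PySem.List.pyRange 10 (n + 1) 1) 9 PySem.Dict.empty
    (by intro k vs h; simp [PySem.Dict.get?_empty] at h)).symm
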